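-- pv_equiv track=rewrite | github.com/Prasanna2609/Mutual-Fund-information-Chatbot | phase_5_retrieval_pipeline/scheme_detector.py | detect_scheme
-- ===== SOURCE A (Python) =====
-- from typing import List, Optional
--
-- ALIAS_MAPPING = {
--     "sbi large cap": "SBI Bluechip Fund Direct Growth",
--     "hdfc large cap": "HDFC Top 100 Fund Direct Growth",
-- }
--
-- def _generate_name_variants(scheme_name: str) -> List[str]:
--     """
--     Generates progressively shorter name variants for flexible matching.
--     E.g., "SBI Bluechip Fund Direct Growth" ->
--         ["sbi bluechip fund", "sbi bluechip"]
--     """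
--     name = scheme_name.lower()
--     # Strip common suffixes progressively
--     for suffix in [" direct growth", " direct plan growth", " growth", " direct"]:
--         name = name.replace(suffix, "")
--     name = name.strip()
--
--     variants = [name]  # e.g., "sbi bluechip fund"
--
--     # Also try without trailing "fund" / "scheme" for partial query matching
--     for word in ["fund", "scheme"]:
--         if name.endswith(f" {word}"):
--             variants.append(name[: -(len(word) + 1)].strip())  # e.g., "sbi bluechip"
--
--     return variants
--
-- def detect_scheme(query: str, known_schemes: List[str]) -> Optional[str]:
--     """
--     Detects if the user query mentions a known mutual fund scheme.
--
--     Matches against known scheme names using case-insensitive substring matching.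
--     Returns the longest matching scheme name (most specific match) to avoid
--     partial matches like "SBI" matching before "SBI Bluechip Fund".
--
--     Args:
--         query: The user's input query string.
--         known_schemes: List of all scheme names from the vector store.
--
--     Returns:
--         The matched scheme name (as stored in metadata), or None if no match found.
--     """
--     query_lower = query.lower()
--
--     # 1. Check for aliases first
--     for alias, canonical_name in ALIAS_MAPPING.items():
--         if alias in query_lower:
--             # Optionally check if the canonical_name is actually in known_schemes
--             # to be completely safe, but usually aliases map to known canonical names.
--             if canonical_name in known_schemes:
--                 return canonical_name
--
--     # 2. Existing flexible matching logic
--     best_match = None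
--     best_match_length = 0
--
--     for scheme in known_schemes:
--         variants = _generate_name_variants(scheme)
--
--         for variant in variants:
--             if variant in query_lower:
--                 if len(variant) > best_match_length:
--                     best_match = scheme  # Return the original scheme name
--                     best_match_length = len(variant)
--
--     return best_match
-- ===== SOURCE B (Python) =====
-- from typing import List, Optional
--
-- ALIAS_MAPPING = {
--     "sbi large cap": "SBI Bluechip Fund Direct Growth",
--     "hdfc large cap": "HDFC Top 100 Fund Direct Growth",
-- }
--
-- def _generate_name_variants(scheme_name: str) -> List[str]:
--     name = scheme_name.lower()
--     for suffix in [" direct growth", " direct plan growth", " growth", " direct"]: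
--         name = name.replace(suffix, "")
--     name = name.strip()
--     variants = [name]
--     for word in ["fund", "scheme"]:
--         if name.endswith(f" {word}"):
--             variants.append(name[: -(len(word) + 1)].strip())
--     return variants
--
-- def detect_scheme(query: str, known_schemes: List[str]) -> Optional[str]:
--     query_lower = query.lower()
--
--     alias_hit = next(
--         (canonical for alias, canonical in ALIAS_MAPPING.items()
--          if alias in query_lower and canonical in known_schemes),
--         None,
--     )
--     if alias_hit is not None:
--         return alias_hit
--
--     candidates = [
--         (scheme, variant)
--         for scheme in known_schemes
--         for variant in _generate_name_variants(scheme)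
--         if variant and variant in query_lower
--     ]
--     ranked = sorted(candidates, key=lambda sv: -len(sv[1]))
--     return ranked[0][0] if ranked else None
-- ===== Notes on version B (the rewrite author's own statement) =====
-- stated objective: alternative
-- what changed: The nested running-max loop with best/best_match_length bookkeeping is replaced by building the flat filtered (scheme, variant) candidate list and taking the head of a stable sort by descending variant length (stability preserves A's first-encountered tie-breaking); the alias early-return loop becomes a next() over a generator.
import Mathlib
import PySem

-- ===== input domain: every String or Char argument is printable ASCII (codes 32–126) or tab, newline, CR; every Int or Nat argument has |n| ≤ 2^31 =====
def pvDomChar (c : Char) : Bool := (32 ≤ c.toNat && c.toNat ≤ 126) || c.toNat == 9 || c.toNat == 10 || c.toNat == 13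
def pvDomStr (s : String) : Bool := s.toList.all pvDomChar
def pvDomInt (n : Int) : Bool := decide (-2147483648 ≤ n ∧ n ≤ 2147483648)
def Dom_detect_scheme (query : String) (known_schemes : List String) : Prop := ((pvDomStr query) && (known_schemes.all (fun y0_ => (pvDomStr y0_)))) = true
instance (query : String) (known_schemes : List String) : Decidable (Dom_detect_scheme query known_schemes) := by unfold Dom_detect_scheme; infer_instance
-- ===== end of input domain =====

-- B replaces A's running-max bookkeeping over nested loops by building the flat candidate
-- list, filtering it, and picking the head of a stable sort by descending variant length
-- (objective: alternative decomposition, same behaviour).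

-- ===== PORT A =====
-- module constant ALIAS_MAPPING (dict literal, insertion order)
def pvAliasMapping : List (String × String) :=
  [("sbi large cap", "SBI Bluechip Fund Direct Growth"),
   ("hdfc large cap", "HDFC Top 100 Fund Direct Growth")]

-- helper _generate_name_variants (identical source in Source A and Source B, shared by both ports)
def pvGenerateNameVariants (scheme_name : String) : List String :=
  let name := PySem.Str.lower scheme_name
  let name := [" direct growth", " direct plan growth", " growth", " direct"].foldl
      (fun n sfx => PySem.Str.replace n sfx "") name
  let name := PySem.Str.strip name
  let variants := [name]
  ["fund", "scheme"].foldl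
    (fun vs word =>
      if PySem.Str.endswith name (" " ++ word) then
        vs ++ [PySem.Str.strip (PySem.Str.slice name none (some (-(PySem.Str.len word + 1))))]
      else vs) variants

-- A's 'for alias, canonical_name in ALIAS_MAPPING.items(): … return canonical_name' early-return loop
def pvAliasLoop (query_lower : String) (known_schemes : List String) : List (String × String) → Option String
  | [] => none
  | (al, canonical) :: rest =>
    if PySem.Str.isIn al query_lower then
      if known_schemes.contains canonical then some canonical
      else pvAliasLoop query_lower known_schemes rest
    else pvAliasLoop query_lower known_schemes rest

def detect_scheme (query : String) (known_schemes : List String) : Option String :=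
  let query_lower := PySem.Str.lower query
  match pvAliasLoop query_lower known_schemes pvAliasMapping with
  | some c => some c
  | none =>
    -- best_match = None; best_match_length = 0; nested for-loops with running max (strict >)
    let st := known_schemes.foldl
      (fun (st : Option String × Int) scheme =>
        (pvGenerateNameVariants scheme).foldl
          (fun (st : Option String × Int) variant =>
            if PySem.Str.isIn variant query_lower then
              if PySem.Str.len variant > st.2 then (some scheme, PySem.Str.len variant) else st
            else st) st)
      (none, 0)
    st.1

-- ===== PORT B =====
def detect_scheme_alt (query : String) (known_schemes : List String) : Option String :=
  let query_lower := PySem.Str.lower query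
  -- alias_hit = next((c for a, c in ALIAS_MAPPING.items() if a in query_lower and c in known_schemes), None)
  let alias_hit := (pvAliasMapping.find? (fun ac =>
      PySem.Str.isIn ac.1 query_lower && known_schemes.contains ac.2)).map (·.2)
  match alias_hit with
  | some c => some c
  | none =>
    -- candidates = [(scheme, variant) for scheme in known_schemes
    --               for variant in _generate_name_variants(scheme) if variant and variant in query_lower]
    let candidates := known_schemes.flatMap (fun scheme =>
        ((pvGenerateNameVariants scheme).filter (fun v =>
            !(v == "") && PySem.Str.isIn v query_lower)).map (fun v => (scheme, v)))
    -- ranked = sorted(candidates, key=lambda sv: -len(sv[1]))  (stable); ranked[0][0] if ranked else None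
    let ranked := PySem.List.sorted candidates (fun sv => -(PySem.Str.len sv.2))
    match ranked with
    | (s, _) :: _ => some s
    | [] => none

-- ===== PRECONDITION & SPEC =====
def Spec_detect_scheme (query : String) (known_schemes : List String) (out : Option String) : Prop := out = detect_scheme_alt query known_schemes
instance (query : String) (known_schemes : List String) (out : Option String) : Decidable (Spec_detect_scheme query known_schemes out) := by unfold Spec_detect_scheme; infer_instance

-- ===== CLAIM (what is proved, stated in full; the proofs are below) =====
def Claim_equal_detect_scheme : Prop := ∀ (query : String) (known_schemes : List String), Dom_detect_scheme query known_schemes → Spec_detect_scheme query known_schemes (detect_scheme query known_schemes)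

-- ===== LEMMAS AND PROOFS =====

-- A's early-return alias loop is find?-then-project
lemma pvAliasLoop_eq_find (ql : String) (ks : List String) (l : List (String × String)) :
    pvAliasLoop ql ks l
      = (l.find? (fun ac => PySem.Str.isIn ac.1 ql && ks.contains ac.2)).map (·.2) := by
  induction l with
  | nil => rfl
  | cons h t ih =>
    obtain ⟨a, c⟩ := h
    cases h1 : PySem.Str.isIn a ql with
    | false =>
      simp only [pvAliasLoop, List.find?_cons, h1, Bool.false_and]
      exact ih
    | true =>
      cases h2 : ks.contains c with
      | false =>
        simp only [pvAliasLoop, List.find?_cons, h1, h2, Bool.true_and, reduceIte]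
        exact ih
      | true =>
        simp only [pvAliasLoop, List.find?_cons, h1, h2, Bool.true_and, reduceIte]
        rfl

-- "first element with strictly smaller key wins" running fold
def pvRunFirst {α : Type} (before : α → α → Bool) (o : Option α) (x : α) : Option α :=
  match o with
  | none => some x
  | some b => if before x b then some x else some b

-- head of the stable insertion sort = running "first strict min" over the list
lemma pvHead_foldl_insertBy {α : Type} (before : α → α → Bool) :
    ∀ (xs : List α) (acc : List α),
      (xs.foldl (fun acc x => PySem.List.insertBy before x acc) acc).head?
        = xs.foldl (pvRunFirst before) acc.head? := by
  intro xs
  induction xs with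
  | nil => intro acc; rfl
  | cons x t ih =>
    intro acc
    simp only [List.foldl_cons]
    rw [ih]
    congr 1
    cases acc with
    | nil => rfl
    | cons b bs =>
      simp only [PySem.List.insertBy, pvRunFirst, List.head?_cons]
      split <;> rfl

lemma pvHead_sorted {α : Type} (xs : List α) (key : α → Int) :
    (PySem.List.sorted xs key).head?
      = xs.foldl (pvRunFirst (fun a b => decide (key a < key b))) none := by
  rw [PySem.List.sorted_eq_foldl_insertBy]
  exact pvHead_foldl_insertBy _ xs []

def pvProj : Option (String × String) → Option String × Int
  | none => (none, 0)
  | some b => (some b.1, PySem.Str.len b.2)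

lemma pvLen_nonneg (v : String) : 0 ≤ PySem.Str.len v := by
  simp [PySem.Str.len]

lemma pvLen_pos_of_ne_empty (v : String) (h : ¬ v = "") : 0 < PySem.Str.len v := by
  simp only [PySem.Str.len]
  have : v.toList ≠ [] := by
    intro hn; exact h (String.toList_eq_nil_iff.mp hn)
  cases hl : v.toList with
  | nil => exact absurd hl this
  | cons c cs => simp

lemma pvProj_snd_nonneg (o : Option (String × String)) : 0 ≤ (pvProj o).2 := by
  cases o with
  | none => simp [pvProj]
  | some b => exact pvLen_nonneg b.2

-- A's running-max fold over all (scheme, variant) pairs = first-strict-min-by-(-len) fold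
-- over the filtered pairs, through pvProj
lemma pvMainFold (ql : String) :
    ∀ (cs : List (String × String)) (o : Option (String × String)),
      cs.foldl
        (fun (st : Option String × Int) sv =>
          if PySem.Str.isIn sv.2 ql then
            if PySem.Str.len sv.2 > st.2 then (some sv.1, PySem.Str.len sv.2) else st
          else st)
        (pvProj o)
      = pvProj ((cs.filter (fun sv => !(sv.2 == "") && PySem.Str.isIn sv.2 ql)).foldl
          (pvRunFirst (fun a b => decide (-(PySem.Str.len a.2) < -(PySem.Str.len b.2)))) o) := by
  intro cs
  induction cs with
  | nil => intro o; rfl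
  | cons sv t ih =>
    intro o
    obtain ⟨s, v⟩ := sv
    cases hin : PySem.Str.isIn v ql with
    | false =>
      simp only [List.foldl_cons, List.filter_cons, hin, Bool.and_false]
      exact ih o
    | true =>
      by_cases hv : v = ""
      · subst hv
        have h0 : PySem.Str.len "" = 0 := by decide
        have hveq : (("" : String) == "") = true := rfl
        simp only [List.foldl_cons, List.filter_cons, hin, hveq, Bool.not_true, Bool.false_and,
          reduceIte, h0]
        rw [if_neg (by have := pvProj_snd_nonneg o; omega)]
        exact ih o
      · have hveq : (v == "") = false := by simp [hv]
        have hstep :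
            (if PySem.Str.len v > (pvProj o).2 then (some s, PySem.Str.len v) else pvProj o)
              = pvProj (pvRunFirst (fun a b => decide (-(PySem.Str.len a.2) < -(PySem.Str.len b.2))) o (s, v)) := by
          cases o with
          | none =>
            have := pvLen_pos_of_ne_empty v hv
            simp only [pvProj, pvRunFirst]
            rw [if_pos (by omega)]
          | some b =>
            simp only [pvProj, pvRunFirst]
            by_cases hlt : PySem.Str.len v > PySem.Str.len b.2
            · rw [if_pos hlt, if_pos (by simp only [decide_eq_true_eq]; omega)]
            · rw [if_neg hlt, if_neg (by simp only [decide_eq_true_eq]; omega)]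
        simp only [List.foldl_cons, List.filter_cons, hin, hveq, Bool.not_false, Bool.and_true,
          reduceIte]
        rw [hstep]
        exact ih _

-- the filtered flat candidate list of A's loop is exactly B's comprehension
lemma pvCandidates_eq (ql : String) (ks : List String) :
    (ks.flatMap (fun s => (pvGenerateNameVariants s).map (fun v => (s, v)))).filter
        (fun sv => !(sv.2 == "") && PySem.Str.isIn sv.2 ql)
      = ks.flatMap (fun s =>
          ((pvGenerateNameVariants s).filter (fun v => !(v == "") && PySem.Str.isIn v ql)).map
            (fun v => (s, v))) := by
  induction ks with
  | nil => rfl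
  | cons s t ih =>
    simp only [List.flatMap_cons, List.filter_append, ih, List.filter_map]
    rfl

-- ===== VERDICT (by name: the statement is the Claim_ definition above) =====
theorem detect_scheme_spec : Claim_equal_detect_scheme := by
  intro query ks _dom
  simp only [Spec_detect_scheme, detect_scheme, detect_scheme_alt]
  rw [pvAliasLoop_eq_find]
  cases hf : (pvAliasMapping.find? (fun ac =>
      PySem.Str.isIn ac.1 (PySem.Str.lower query) && ks.contains ac.2)) with
  | some c => simp
  | none =>
    simp only [Option.map_none]
    -- both sides in the no-alias branch
    have hA :
        ks.foldl
          (fun (st : Option String × Int) scheme =>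
            (pvGenerateNameVariants scheme).foldl
              (fun (st : Option String × Int) variant =>
                if PySem.Str.isIn variant (PySem.Str.lower query) then
                  if PySem.Str.len variant > st.2 then (some scheme, PySem.Str.len variant) else st
                else st) st)
          (none, 0)
        = (ks.flatMap (fun s => (pvGenerateNameVariants s).map (fun v => (s, v)))).foldl
            (fun (st : Option String × Int) sv =>
              if PySem.Str.isIn sv.2 (PySem.Str.lower query) then
                if PySem.Str.len sv.2 > st.2 then (some sv.1, PySem.Str.len sv.2) else st
              else st)
            (none, 0) := by
      rw [List.foldl_flatMap]
      apply PySem.List.foldl_congr_mem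
      intro acc x _
      rw [List.foldl_map]
    have hmain := pvMainFold (PySem.Str.lower query)
      (ks.flatMap (fun s => (pvGenerateNameVariants s).map (fun v => (s, v)))) none
    rw [pvCandidates_eq] at hmain
    have hhead := pvHead_sorted
      (ks.flatMap (fun s =>
        ((pvGenerateNameVariants s).filter
          (fun v => !(v == "") && PySem.Str.isIn v (PySem.Str.lower query))).map (fun v => (s, v))))
      (fun sv => -(PySem.Str.len sv.2))
    cases hs : PySem.List.sorted
        (ks.flatMap (fun s =>
          ((pvGenerateNameVariants s).filter
            (fun v => !(v == "") && PySem.Str.isIn v (PySem.Str.lower query))).map (fun v => (s, v))))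
        (fun sv => -(PySem.Str.len sv.2)) with
    | nil =>
      rw [hs] at hhead
      simp only [List.head?_nil] at hhead
      rw [show (pvProj (none : Option (String × String))) = ((none : Option String), (0 : Int)) from rfl] at hmain
      rw [hA, hmain, ← hhead]
      rfl
    | cons p rest =>
      rw [hs] at hhead
      simp only [List.head?_cons] at hhead
      obtain ⟨ps, pv⟩ := p
      rw [show (pvProj (none : Option (String × String))) = ((none : Option String), (0 : Int)) from rfl] at hmain
      rw [hA, hmain, ← hhead]
      rfl
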